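-- pv_equiv track=rewrite | github.com/Shinigami0Hacker/SpringCapstone2025 | t1.py | ordered_column_permutation1
-- ===== SOURCE A (Python) =====
-- from itertools import combinations, permutations
--
-- def ordered_column_permutation1(columns):
--     """
--     Only match when column are spoken in order
--     @Output:
--     - list[Tuple[Tuple[match_word, index]]]
--     """
--     result = []
--     indexed_lst = list(enumerate(columns))
--     for r in range(1, len(columns)+1):
--         for comb in combinations(indexed_lst, r):
--             values = [value for idx, value in comb]
--             indexes = [idx for idx, value in comb]
--             result.append((values, indexes))
--
--     return result
-- ===== SOURCE B (Python) =====
-- def ordered_column_permutation1(columns):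
--     """
--     Only match when column are spoken in order
--     @Output:
--     - list[Tuple[Tuple[match_word, index]]]
--     """
--     def subs(items):
--         if not items:
--             return [[]]
--         rest = subs(items[1:])
--         return [[items[0]] + s for s in rest] + rest
--
--     pool = subs(list(enumerate(columns)))
--     return [([value for idx, value in p], [idx for idx, value in p])
--             for r in range(1, len(columns) + 1)
--             for p in pool if len(p) == r]
-- ===== Notes on version B (the rewrite author's own statement) =====
-- stated objective: alternative
-- what changed: B replaces the per-size itertools.combinations loops with a single structural recursion that generates all subsequences of the enumerated list once, then groups them by length; A calls combinations(indexed, r) for each r.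
import Mathlib
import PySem

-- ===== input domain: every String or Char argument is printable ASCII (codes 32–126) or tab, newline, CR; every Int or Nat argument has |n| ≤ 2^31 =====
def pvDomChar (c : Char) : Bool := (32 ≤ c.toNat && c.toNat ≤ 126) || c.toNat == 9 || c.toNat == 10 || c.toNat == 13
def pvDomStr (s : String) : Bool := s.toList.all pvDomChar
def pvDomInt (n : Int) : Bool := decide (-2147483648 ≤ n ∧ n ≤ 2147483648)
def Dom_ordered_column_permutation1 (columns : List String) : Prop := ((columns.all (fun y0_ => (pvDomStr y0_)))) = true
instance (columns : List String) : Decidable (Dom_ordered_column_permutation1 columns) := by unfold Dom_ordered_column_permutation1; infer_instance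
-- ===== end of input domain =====

-- B generates all subsequences once by structural recursion and groups them by length,
-- instead of A's per-size itertools.combinations loops; same result, alternative algorithm.

-- ===== PORT A =====
def ordered_column_permutation1 (columns : List String) : List (List String × List Int) :=
  let indexed_lst := PySem.List.enumerate columns
  (PySem.List.pyRange 1 ((columns.length : Int) + 1) 1).foldl (fun result r =>
    (PySem.List.combinations indexed_lst r.toNat).foldl (fun result comb =>
      result ++ [(comb.map (fun p => p.2), comb.map (fun p => p.1))]) result) []

-- ===== PORT B =====
-- helper: B's recursive 'subs' — all subsequences, the ones containing the head first
def pvSubs {α : Type} : List α → List (List α)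
  | [] => [[]]
  | x :: xs => (pvSubs xs).map (x :: ·) ++ pvSubs xs

def ordered_column_permutation1_alt (columns : List String) : List (List String × List Int) :=
  let pool := pvSubs (PySem.List.enumerate columns)
  (PySem.List.pyRange 1 ((columns.length : Int) + 1) 1).flatMap (fun r =>
    (pool.filter (fun p => (p.length : Int) == r)).map
      (fun p => (p.map (fun q => q.2), p.map (fun q => q.1))))

-- ===== PRECONDITION & SPEC =====
def Spec_ordered_column_permutation1 (columns : List String) (out : List (List String × List Int)) : Prop := out = ordered_column_permutation1_alt columns
instance (columns : List String) (out : List (List String × List Int)) : Decidable (Spec_ordered_column_permutation1 columns out) := by unfold Spec_ordered_column_permutation1; infer_instance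

-- ===== CLAIM (what is proved, stated in full; the proofs are below) =====
def Claim_equal_ordered_column_permutation1 : Prop := ∀ (columns : List String), Dom_ordered_column_permutation1 columns → Spec_ordered_column_permutation1 columns (ordered_column_permutation1 columns)

-- ===== LEMMAS AND PROOFS =====

-- the length-k subsequences of l, in pvSubs order, are exactly itertools.combinations(l, k)
theorem pvSubs_filter_length {α : Type} (l : List α) :
    ∀ k : Nat, (pvSubs l).filter (fun p => p.length == k) = PySem.List.combinations l k := by
  induction l with
  | nil =>
    intro k
    cases k with
    | zero => simp [pvSubs, PySem.List.combinations_zero]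
    | succ k => simp [pvSubs, PySem.List.combinations_nil_succ]
  | cons x xs ih =>
    intro k
    cases k with
    | zero =>
      rw [PySem.List.combinations_zero, pvSubs, List.filter_append, List.filter_map]
      have h1 : List.filter ((fun p => p.length == 0) ∘ fun s => x :: s) (pvSubs xs) = [] := by
        simp
      rw [h1]
      simpa [PySem.List.combinations_zero] using ih 0
    | succ k =>
      rw [PySem.List.combinations_cons_succ, pvSubs]
      rw [List.filter_append, List.filter_map]
      rw [← ih k, ← ih (k+1)]
      congr 1
      congr 1
      apply List.filter_congr
      intro p _
      simp

theorem ordered_column_permutation1_eq (columns : List String) :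
    ordered_column_permutation1 columns = ordered_column_permutation1_alt columns := by
  unfold ordered_column_permutation1 ordered_column_permutation1_alt
  rw [PySem.List.foldl_congr_mem (g := fun result r =>
    result ++ ((PySem.List.combinations (PySem.List.enumerate columns) r.toNat).map
      (fun comb => (comb.map (fun p => p.2), comb.map (fun p => p.1)))))]
  · rw [PySem.List.foldl_append_eq_flatMap]
    simp only [List.nil_append]
    apply List.flatMap_congr
    intro r hr
    have hmem := (PySem.List.mem_pyRange_one).mp hr
    have h1 : (1 : Int) ≤ r := hmem.1
    rw [← pvSubs_filter_length (PySem.List.enumerate columns) r.toNat]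
    congr 1
    apply List.filter_congr
    intro p _
    have : ((p.length : Int) = r) ↔ (p.length = r.toNat) := by omega
    simp [this]
  · intro acc r _
    rw [PySem.List.foldl_append_singleton_eq_map]

-- ===== VERDICT (by name: the statement is the Claim_ definition above) =====
theorem ordered_column_permutation1_spec : Claim_equal_ordered_column_permutation1 := by
  intro columns _
  unfold Spec_ordered_column_permutation1
  exact ordered_column_permutation1_eq columns
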